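-- pv_equiv track=rewrite | github.com/Priyansh9506/Prototype-Zero-v2 | api/main.py | classify_condition
-- ===== SOURCE A (Python) =====
-- def classify_condition(predictions):
--     if len(predictions) == 0:
--         return "Safe"
--     severity = 0
--     for p in predictions:
--         label = p["class"].lower()
--         if "hole" in label or "rust" in label:
--             severity = max(severity, 2) # Damaged
--         elif "dent" in label or "deframe" in label:
--             severity = max(severity, 1) # Faulty
--
--     if severity == 2: return "Damaged"
--     if severity == 1: return "Faulty"
--     return "Safe"
-- ===== SOURCE B (Python) =====
-- def classify_condition(predictions):
--     if any("hole" in p["class"].lower() or "rust" in p["class"].lower() for p in predictions):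
--         return "Damaged"
--     if any("dent" in p["class"].lower() or "deframe" in p["class"].lower() for p in predictions):
--         return "Faulty"
--     return "Safe"
-- ===== Notes on version B (the rewrite author's own statement) =====
-- stated objective: simpler
-- what changed: Replaces the severity-integer accumulator loop (plus empty-list guard and final if-chain) with two priority-ordered short-circuit any() scans returning the level directly.
import Mathlib
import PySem

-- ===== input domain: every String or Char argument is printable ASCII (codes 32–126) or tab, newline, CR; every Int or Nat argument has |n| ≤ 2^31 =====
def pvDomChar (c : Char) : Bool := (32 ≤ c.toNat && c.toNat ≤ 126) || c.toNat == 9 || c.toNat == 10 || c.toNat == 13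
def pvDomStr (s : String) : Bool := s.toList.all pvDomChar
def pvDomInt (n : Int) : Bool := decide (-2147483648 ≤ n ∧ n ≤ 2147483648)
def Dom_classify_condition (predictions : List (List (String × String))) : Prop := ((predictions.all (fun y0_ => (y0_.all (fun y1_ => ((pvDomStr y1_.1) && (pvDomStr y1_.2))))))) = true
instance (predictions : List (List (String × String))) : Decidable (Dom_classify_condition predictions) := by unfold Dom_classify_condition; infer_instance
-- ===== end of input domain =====

-- B replaces A's severity-integer accumulator loop with two priority-ordered short-circuit scans (simpler).

-- ===== PORT A =====
-- A: guard on empty list, then fold a severity integer over the predictions, then decode it.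
def classify_condition (predictions : List (List (String × String))) : String :=
  if predictions.length = 0 then "Safe"
  else
    let severity : Int := predictions.foldl (fun sev p =>
      let label := PySem.Str.lower (((PySem.Dict.mk p).get? "class").getD "")
      if PySem.Str.isIn "hole" label || PySem.Str.isIn "rust" label then max sev 2
      else if PySem.Str.isIn "dent" label || PySem.Str.isIn "deframe" label then max sev 1
      else sev) (0 : Int)
    if severity = 2 then "Damaged"
    else if severity = 1 then "Faulty"
    else "Safe"

-- ===== PORT B =====
def pvLabel (p : List (String × String)) : String :=
  PySem.Str.lower (((PySem.Dict.mk p).get? "class").getD "")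

def classify_condition_alt (predictions : List (List (String × String))) : String :=
  if predictions.any (fun p =>
      PySem.Str.isIn "hole" (pvLabel p) || PySem.Str.isIn "rust" (pvLabel p)) then "Damaged"
  else if predictions.any (fun p =>
      PySem.Str.isIn "dent" (pvLabel p) || PySem.Str.isIn "deframe" (pvLabel p)) then "Faulty"
  else "Safe"

-- ===== PRECONDITION & SPEC =====
-- Pre_ excludes exactly the inputs where A raises KeyError: a prediction dict without the "class" key.
def Pre_classify_condition (predictions : List (List (String × String))) : Prop :=
  (predictions.all (fun p => (PySem.Dict.mk p).contains "class")) = true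
instance (predictions : List (List (String × String))) : Decidable (Pre_classify_condition predictions) := by unfold Pre_classify_condition; infer_instance
def pvWitness_classify_condition : (List (List (String × String))) := [[("class", "Hole")], [("class", "dent")]]

def Spec_classify_condition (predictions : List (List (String × String))) (out : String) : Prop := out = classify_condition_alt predictions
instance (predictions : List (List (String × String))) (out : String) : Decidable (Spec_classify_condition predictions out) := by unfold Spec_classify_condition; infer_instance

-- ===== CLAIM (what is proved, stated in full; the proofs are below) =====
def Claim_equal_classify_condition : Prop := ∀ (predictions : List (List (String × String))), Dom_classify_condition predictions → Pre_classify_condition predictions → Spec_classify_condition predictions (classify_condition predictions)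

-- ===== LEMMAS AND PROOFS =====

-- abbreviations used only by the proofs
def pvDmg (p : List (String × String)) : Bool :=
  PySem.Str.isIn "hole" (pvLabel p) || PySem.Str.isIn "rust" (pvLabel p)
def pvFlt (p : List (String × String)) : Bool :=
  PySem.Str.isIn "dent" (pvLabel p) || PySem.Str.isIn "deframe" (pvLabel p)
def pvSev (l : List (List (String × String))) : Int :=
  if l.any pvDmg then 2 else if l.any pvFlt then 1 else 0

lemma pvSev_nonneg (l : List (List (String × String))) : 0 ≤ pvSev l := by
  unfold pvSev; split_ifs <;> omega

lemma pvSev_le_two (l : List (List (String × String))) : pvSev l ≤ 2 := by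
  unfold pvSev; split_ifs <;> omega

lemma fold_eq_pvSev (l : List (List (String × String))) (sev : Int) (h : 0 ≤ sev) :
    l.foldl (fun sev p =>
      let label := PySem.Str.lower (((PySem.Dict.mk p).get? "class").getD "")
      if PySem.Str.isIn "hole" label || PySem.Str.isIn "rust" label then max sev 2
      else if PySem.Str.isIn "dent" label || PySem.Str.isIn "deframe" label then max sev 1
      else sev) sev = max sev (pvSev l) := by
  show l.foldl (fun sev p =>
      if pvDmg p = true then max sev 2
      else if pvFlt p = true then max sev 1
      else sev) sev = max sev (pvSev l)
  induction l generalizing sev with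
  | nil => simp [pvSev]; omega
  | cons p t ih =>
    simp only [List.foldl_cons]
    by_cases hd : pvDmg p = true
    · rw [if_pos hd, ih _ (by omega)]
      have hs : pvSev (p :: t) = 2 := by unfold pvSev; simp [hd]
      rw [hs]
      have h2 := pvSev_le_two t
      omega
    · have hd' : pvDmg p = false := by simpa using hd
      rw [if_neg hd]
      by_cases hf : pvFlt p = true
      · rw [if_pos hf, ih _ (by omega)]
        have hs : pvSev (p :: t) = max 1 (pvSev t) := by
          unfold pvSev
          simp only [List.any_cons, hd', hf, Bool.false_or, Bool.true_or]
          split_ifs <;> omega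
        rw [hs]
        have h0 := pvSev_nonneg t
        have h2 := pvSev_le_two t
        omega
      · have hf' : pvFlt p = false := by simpa using hf
        rw [if_neg hf, ih _ h]
        have hs : pvSev (p :: t) = pvSev t := by
          unfold pvSev
          simp [List.any_cons, hd', hf']
        rw [hs]

-- ===== VERDICT (by name: the statement is the Claim_ definition above) =====
theorem classify_condition_spec : Claim_equal_classify_condition := by
  intro predictions _ _
  unfold Spec_classify_condition classify_condition
  have halt : classify_condition_alt predictions =
      if predictions.any pvDmg then "Damaged"
      else if predictions.any pvFlt then "Faulty"
      else "Safe" := rfl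
  rw [halt]
  by_cases hnil : predictions = []
  · subst hnil; simp
  · have hlen : ¬ predictions.length = 0 := by simpa using hnil
    simp only [hlen, if_false]
    rw [fold_eq_pvSev predictions 0 le_rfl]
    have hmax : max (0 : Int) (pvSev predictions) = pvSev predictions := by
      have := pvSev_nonneg predictions; omega
    rw [hmax]
    unfold pvSev
    split_ifs <;> simp_all
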